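-- pv_equiv track=rewrite | github.com/steinrue/chimp | Simulation_Studies/analysis_msmc2/jobs_handler/py_scripts/analysis_routines.py | indPair
-- ===== SOURCE A (Python) =====
-- def indPair(num_haps):
--     out = ""
--     for i in range(num_haps-1):
--         if i%2 == 0:
--             out += f"{i}-{i+1}"
--         else:
--             if(i != num_haps-2):
--                 out += ","
--     return out
-- ===== SOURCE B (Python) =====
-- def indPair(num_haps):
--     return ",".join(f"{i}-{i+1}" for i in range(0, num_haps - 1, 2))
-- ===== Notes on version B (the rewrite author's own statement) =====
-- stated objective: simpler
-- what changed: Replaces the index-by-index loop with a parity branch and manual trailing-comma bookkeeping by a single ','.join over a step-2 range that visits only the pair-starting even indices.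
import Mathlib
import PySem

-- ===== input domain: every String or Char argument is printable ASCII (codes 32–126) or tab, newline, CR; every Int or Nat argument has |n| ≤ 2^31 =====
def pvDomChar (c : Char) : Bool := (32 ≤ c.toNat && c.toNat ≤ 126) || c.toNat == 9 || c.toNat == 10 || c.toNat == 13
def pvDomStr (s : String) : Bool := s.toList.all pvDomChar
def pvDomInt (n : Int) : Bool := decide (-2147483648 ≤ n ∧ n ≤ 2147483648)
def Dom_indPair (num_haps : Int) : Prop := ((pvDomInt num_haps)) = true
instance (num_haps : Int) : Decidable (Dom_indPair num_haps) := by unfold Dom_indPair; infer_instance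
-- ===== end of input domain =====

-- B replaces A's per-index loop (parity branch + manual trailing-comma guard) by one ','.join
-- over a step-2 range of the pair-starting indices; simpler, same result.

-- ===== PORT A =====
-- A: out = ""; for i in range(num_haps-1): even i appends f"{i}-{i+1}", odd i appends ","
--    unless i == num_haps-2.
def indPair (num_haps : Int) : String :=
  (PySem.List.pyRange 0 (num_haps - 1) 1).foldl
    (fun out i =>
      if PySem.Int.mod i 2 = 0 then
        out ++ (PySem.Int.toStr i ++ "-" ++ PySem.Int.toStr (i + 1))
      else
        if i ≠ num_haps - 2 then out ++ "," else out)
    ""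

-- ===== PORT B =====
-- B: ",".join(f"{i}-{i+1}" for i in range(0, num_haps-1, 2))
def indPair_alt (num_haps : Int) : String :=
  PySem.Str.join ","
    ((PySem.List.pyRange 0 (num_haps - 1) 2).map
      (fun i => PySem.Int.toStr i ++ "-" ++ PySem.Int.toStr (i + 1)))

-- ===== PRECONDITION & SPEC =====
def Spec_indPair (num_haps : Int) (out : String) : Prop := out = indPair_alt num_haps
instance (num_haps : Int) (out : String) : Decidable (Spec_indPair num_haps out) := by unfold Spec_indPair; infer_instance

-- ===== CLAIM (what is proved, stated in full; the proofs are below) =====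
def Claim_equal_indPair : Prop := ∀ (num_haps : Int), Dom_indPair num_haps → Spec_indPair num_haps (indPair num_haps)

-- ===== LEMMAS AND PROOFS =====

-- char-list image of the f-string "{i}-{i+1}"
def pairC (i : Int) : List Char := PySem.Int.toChars i ++ '-' :: PySem.Int.toChars (i + 1)

lemma toList_pair (i : Int) :
    (PySem.Int.toStr i ++ "-" ++ PySem.Int.toStr (i + 1)).toList = pairC i := by
  simp [pairC, PySem.Int.toList_toStr]

-- A's loop body on char lists, with the comma appended at EVERY odd index (valid for the
-- prefix of the loop, where i ≠ num_haps-2 always holds)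
def G : Nat → List Char
  | 0 => []
  | k + 1 => G k ++ (if k % 2 = 0 then pairC (k : Int) else [','])

-- B's value with p pairs, on char lists
def J (p : Nat) : List Char :=
  PySem.Chars.join [','] ((List.range p).map (fun k : Nat => pairC ((2 * k : Nat) : Int)))

lemma join_append_singleton (sep y : List Char) (xs : List (List Char)) :
    PySem.Chars.join sep (xs ++ [y]) =
      (if xs = [] then y else PySem.Chars.join sep xs ++ sep ++ y) := by
  induction xs with
  | nil => simp [PySem.Chars.join_singleton]
  | cons a xs ih =>
    cases xs with
    | nil => simp [PySem.Chars.join_cons_cons, PySem.Chars.join_singleton]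
    | cons b xs =>
      simp only [List.cons_append, PySem.Chars.join_cons_cons] at *
      simp [ih, List.append_assoc]

lemma J_succ (p : Nat) :
    J (p + 1) = (if p = 0 then [] else J p ++ [',']) ++ pairC ((2 * p : Nat) : Int) := by
  unfold J
  rw [List.range_succ, List.map_append, List.map_singleton, join_append_singleton]
  simp only [List.map_eq_nil_iff, List.range_eq_nil]
  split_ifs with h
  · simp [h]
  · simp [List.append_assoc]

lemma G_even (p : Nat) : G (2 * p) = J p ++ (if p = 0 then [] else [',']) := by
  induction p with
  | zero => simp [G, J, PySem.Chars.join_nil]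
  | succ q ih =>
    have h2 : 2 * (q + 1) = (2 * q + 1) + 1 := by omega
    rw [h2]
    show G (2 * q + 1) ++ _ = _
    have hodd : G (2 * q + 1) = G (2 * q) ++ pairC ((2 * q : Nat) : Int) := by
      show G (2 * q) ++ _ = _
      have h0 : (2 * q) % 2 = 0 := by omega
      rw [h0]
      simp
    have hmod : (2 * q + 1) % 2 = 1 := by omega
    rw [hodd, ih, hmod, J_succ]
    by_cases hq : q = 0
    · subst hq; simp [J, PySem.Chars.join_nil]
    · simp [hq, List.append_assoc]

lemma G_pair (p : Nat) : G (2 * p) ++ pairC ((2 * p : Nat) : Int) = J (p + 1) := by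
  rw [G_even, J_succ]
  by_cases hq : p = 0
  · subst hq; simp [J, PySem.Chars.join_nil]
  · simp [hq, List.append_assoc]

lemma G_odd (p : Nat) : G (2 * p + 1) = J (p + 1) := by
  show G (2 * p) ++ _ = _
  have h0 : (2 * p) % 2 = 0 := by omega
  rw [h0]
  simpa using G_pair p

-- the fold over the loop's prefix range(k), k ≤ num_haps-2: the comma branch always fires at odd i
lemma fold_prefix (num_haps : Int) (k : Nat) (hk : (k : Int) ≤ num_haps - 2) :
    ((PySem.List.pyRange 0 (k : Int) 1).foldl
      (fun out i =>
        if PySem.Int.mod i 2 = 0 then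
          out ++ (PySem.Int.toStr i ++ "-" ++ PySem.Int.toStr (i + 1))
        else
          if i ≠ num_haps - 2 then out ++ "," else out)
      "").toList = G k := by
  induction k with
  | zero => simp [G]
  | succ m ih =>
    have hm : (m : Int) ≤ num_haps - 2 := by push_cast at hk ⊢; omega
    have hcast : ((m + 1 : Nat) : Int) = (m : Int) + 1 := by push_cast; ring
    rw [hcast, PySem.List.pyRange_one_succ_right (by positivity), List.foldl_append]
    simp only [List.foldl_cons, List.foldl_nil]
    by_cases hpar : m % 2 = 0
    · have hmod : PySem.Int.mod (m : Int) 2 = 0 := by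
        rw [PySem.Int.mod_eq_emod_of_pos (by norm_num)]; omega
      have hG : G (m + 1) = G m ++ (if m % 2 = 0 then pairC (m : Int) else [',']) := rfl
      rw [if_pos hmod, hG, if_pos hpar, String.toList_append, toList_pair, ih hm]
    · have hmod : ¬ PySem.Int.mod (m : Int) 2 = 0 := by
        rw [PySem.Int.mod_eq_emod_of_pos (by norm_num)]; omega
      have hne : ((m : Int) ≠ num_haps - 2) := by push_cast at hk; omega
      have hG : G (m + 1) = G m ++ (if m % 2 = 0 then pairC (m : Int) else [',']) := rfl
      rw [if_neg hmod, if_pos hne, hG, if_neg hpar, String.toList_append, ih hm]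
      simp

lemma indPair_alt_toList (num_haps : Int) (N : Nat) (hN : (N : Int) = num_haps - 1) :
    (indPair_alt num_haps).toList = J ((N + 1) / 2) := by
  unfold indPair_alt
  rw [PySem.List.pyRange_of_pos _ _ (by norm_num : (0:Int) < 2)]
  rw [PySem.Str.toList_join]
  unfold J
  rw [← hN]
  rcases Nat.eq_zero_or_pos N with h0 | h0
  · subst h0
    norm_num [PySem.Chars.join_nil]
  · have hlt : (0 : Int) < (N : Int) := by exact_mod_cast h0
    rw [if_pos hlt]
    congr 1
    have harg : ((N : Int) - 0 + 2 - 1) / 2 = (((N + 1) / 2 : Nat) : Int) := by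
      rw [Int.natCast_div]
      push_cast
      ring_nf
    rw [harg, Int.toNat_natCast, List.map_map, List.map_map]
    apply List.map_congr_left
    intro k _
    simp [Function.comp]
    norm_cast

lemma indPair_eq_alt (num_haps : Int) : indPair num_haps = indPair_alt num_haps := by
  apply String.toList_inj.mp
  rcases le_or_gt (num_haps - 1) 0 with h1 | h1
  · unfold indPair indPair_alt
    rw [PySem.List.pyRange_one_eq_nil h1,
        PySem.List.pyRange_of_pos _ _ (by norm_num : (0:Int) < 2),
        if_neg (by omega : ¬ (0 : Int) < num_haps - 1)]
    simp [PySem.Str.toList_join, PySem.Chars.join_nil]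
  · -- num_haps - 1 = N ≥ 1
    obtain ⟨N, hN⟩ : ∃ N : Nat, (N : Int) = num_haps - 1 :=
      ⟨(num_haps - 1).toNat, Int.toNat_of_nonneg (by omega)⟩
    have hN1 : 1 ≤ N := by omega
    rw [indPair_alt_toList num_haps N hN]
    unfold indPair
    have hcast : num_haps - 1 = ((N - 1 : Nat) : Int) + 1 := by omega
    rw [hcast, PySem.List.pyRange_one_succ_right (by positivity), List.foldl_append]
    simp only [List.foldl_cons, List.foldl_nil]
    have hlast : ((N - 1 : Nat) : Int) = num_haps - 2 := by omega
    by_cases hpar : (N - 1) % 2 = 0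
    · -- last index even: appends the final pair; N - 1 = 2p, result J (p+1), (N+1)/2 = p+1
      obtain ⟨p, hp⟩ : ∃ p, N - 1 = 2 * p := ⟨(N - 1) / 2, by omega⟩
      have hmod : PySem.Int.mod ((N - 1 : Nat) : Int) 2 = 0 := by
        rw [PySem.Int.mod_eq_emod_of_pos (by norm_num)]; omega
      rw [if_pos hmod]
      have hdiv : (N + 1) / 2 = p + 1 := by omega
      rw [hdiv]
      rw [String.toList_append, toList_pair]
      rw [fold_prefix num_haps (N - 1) (by omega), hp, ← G_pair]
    · -- last index odd: it equals num_haps-2, nothing appended; N - 1 = 2p+1, result J (p+1)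
      obtain ⟨p, hp⟩ : ∃ p, N - 1 = 2 * p + 1 := ⟨(N - 1) / 2, by omega⟩
      have hmod : ¬ PySem.Int.mod ((N - 1 : Nat) : Int) 2 = 0 := by
        rw [PySem.Int.mod_eq_emod_of_pos (by norm_num)]; omega
      rw [if_neg hmod, if_neg (by simp [hlast])]
      have hdiv : (N + 1) / 2 = p + 1 := by omega
      rw [hdiv, fold_prefix num_haps (N - 1) (by omega), hp, G_odd]

-- ===== VERDICT (by name: the statement is the Claim_ definition above) =====
theorem indPair_spec : Claim_equal_indPair := by
  intro num_haps _
  unfold Spec_indPair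
  exact indPair_eq_alt num_haps
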